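-- pv_equiv track=rewrite | github.com/OrangeAps/project_winter_2020 | MiscellDefAndVars.py | process_coords
-- ===== SOURCE A (Python) =====
-- def process_coords(yw, ww, hw, xm, ym, i):
--     i += 1
--     n = -1
--     if ym >= yw and ym <= yw + hw:
--         xw = 15
--         for _ in range(i):
--             if xm >= xw and xm <= xw + ww:
--                 if _ == i - 1:
--                     n = 0
--                 else:
--                     n = _ + 1
--             xw += ww + 15
--     return n
-- ===== SOURCE B (Python) =====
-- def process_coords(yw, ww, hw, xm, ym, i):
--     # O(1): interval k covers [15 + k*(ww+15), 15 + k*(ww+15) + ww]; find k by division.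
--     if not (yw <= ym <= yw + hw) or ww < 0:
--         return -1
--     q, r = divmod(xm - 15, ww + 15)
--     if 0 <= q <= i and r <= ww:
--         return 0 if q == i else q + 1
--     return -1
-- ===== Notes on version B (the rewrite author's own statement) =====
-- stated objective: faster
-- what changed: Replaces the O(i) scan over candidate intervals by a single divmod computing the containing interval's index directly, with bound checks.
import Mathlib
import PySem

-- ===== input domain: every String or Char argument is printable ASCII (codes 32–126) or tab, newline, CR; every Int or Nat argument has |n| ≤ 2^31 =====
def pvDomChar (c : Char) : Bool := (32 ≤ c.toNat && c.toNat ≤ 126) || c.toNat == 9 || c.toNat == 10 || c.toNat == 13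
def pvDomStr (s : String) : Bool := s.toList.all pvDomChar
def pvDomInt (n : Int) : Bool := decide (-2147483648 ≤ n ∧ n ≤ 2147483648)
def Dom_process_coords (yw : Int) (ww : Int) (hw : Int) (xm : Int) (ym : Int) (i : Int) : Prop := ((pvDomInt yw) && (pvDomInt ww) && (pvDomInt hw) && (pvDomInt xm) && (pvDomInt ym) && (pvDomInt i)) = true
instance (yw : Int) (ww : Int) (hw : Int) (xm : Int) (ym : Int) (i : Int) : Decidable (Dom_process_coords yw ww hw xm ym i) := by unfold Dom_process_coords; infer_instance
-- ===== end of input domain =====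

-- B replaces A's O(i) scan over the intervals by a single divmod (O(1)); return value only.

-- ===== PORT A =====
-- loop body of A's for-loop: state (xw, n), loop variable u (Python's _)
def pcStep (ww xm c : Int) (s : Int × Int) (u : Int) : Int × Int :=
  (s.1 + (ww + 15),
   if xm ≥ s.1 ∧ xm ≤ s.1 + ww then (if u = c then 0 else u + 1) else s.2)

def process_coords (yw : Int) (ww : Int) (hw : Int) (xm : Int) (ym : Int) (i : Int) : Int :=
  let i := i + 1
  let n : Int := -1
  if ym ≥ yw ∧ ym ≤ yw + hw then
    ((PySem.List.pyRange 0 i 1).foldl (pcStep ww xm (i - 1)) (15, n)).2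
  else n

-- ===== PORT B =====
def process_coords_alt (yw : Int) (ww : Int) (hw : Int) (xm : Int) (ym : Int) (i : Int) : Int :=
  if ¬ (yw ≤ ym ∧ ym ≤ yw + hw) ∨ ww < 0 then -1
  else
    let q := PySem.Int.floordiv (xm - 15) (ww + 15)
    let r := PySem.Int.mod (xm - 15) (ww + 15)
    if 0 ≤ q ∧ q ≤ i ∧ r ≤ ww then (if q = i then 0 else q + 1) else -1

-- ===== PRECONDITION & SPEC =====
def Spec_process_coords (yw : Int) (ww : Int) (hw : Int) (xm : Int) (ym : Int) (i : Int) (out : Int) : Prop := out = process_coords_alt yw ww hw xm ym i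
instance (yw : Int) (ww : Int) (hw : Int) (xm : Int) (ym : Int) (i : Int) (out : Int) : Decidable (Spec_process_coords yw ww hw xm ym i out) := by unfold Spec_process_coords; infer_instance

-- ===== CLAIM (what is proved, stated in full; the proofs are below) =====
def Claim_equal_process_coords : Prop := ∀ (yw : Int) (ww : Int) (hw : Int) (xm : Int) (ym : Int) (i : Int), Dom_process_coords yw ww hw xm ym i → Spec_process_coords yw ww hw xm ym i (process_coords yw ww hw xm ym i)

-- ===== LEMMAS AND PROOFS =====

-- With a negative width no interval can contain xm, so the loop never updates n.
theorem pc_loop_neg (ww xm c : Int) (hww : ww < 0) :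
    ∀ (m : Nat) (x0 n0 : Int),
      (PySem.List.pyRange 0 (m : Int) 1).foldl (pcStep ww xm c) (x0, n0)
        = (x0 + (m : Int) * (ww + 15), n0) := by
  intro m
  induction m with
  | zero => intro x0 n0; simp [PySem.List.pyRange_one_eq_nil]
  | succ m ih =>
    intro x0 n0
    have h : ((m + 1 : Nat) : Int) = (m : Int) + 1 := by push_cast; ring
    rw [h, PySem.List.pyRange_one_succ_right (by positivity), List.foldl_append, ih]
    simp only [List.foldl, pcStep]
    have hno : ¬ (xm ≥ x0 + (m : Int) * (ww + 15) ∧ xm ≤ x0 + (m : Int) * (ww + 15) + ww) := by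
      rintro ⟨h1, h2⟩; linarith
    rw [if_neg hno]
    simp only [Prod.mk.injEq]
    exact ⟨by ring, trivial⟩

-- floor-division uniqueness for a positive divisor
theorem pc_unique_q {s q m r : Int} (hs : 0 < s) (hr0 : 0 ≤ r) (hrs : r < s)
    (h1 : m * s ≤ q * s + r) (h2 : q * s + r < m * s + s) : q = m := by
  by_contra h
  rcases lt_or_gt_of_ne h with hlt | hgt
  · have hle : q + 1 ≤ m := by omega
    have := mul_le_mul_of_nonneg_right hle hs.le
    nlinarith
  · have hle : m + 1 ≤ q := by omega
    have := mul_le_mul_of_nonneg_right hle hs.le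
    nlinarith

-- With ww ≥ 0 the loop's final n is determined by the floor quotient/remainder of xm-15 by ww+15.
theorem pc_loop_pos (ww xm c q r : Int) (hww : 0 ≤ ww)
    (hq : xm - 15 = q * (ww + 15) + r) (hr0 : 0 ≤ r) (hr1 : r < ww + 15) :
    ∀ (m : Nat),
      (PySem.List.pyRange 0 (m : Int) 1).foldl (pcStep ww xm c) (15, -1)
        = (15 + (m : Int) * (ww + 15),
           if 0 ≤ q ∧ q < (m : Int) ∧ r ≤ ww then (if q = c then 0 else q + 1) else -1) := by
  intro m
  induction m with
  | zero =>
    rw [if_neg (by rintro ⟨h1, h2, h3⟩; simp at h2; omega)]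
    simp [PySem.List.pyRange_one_eq_nil]
  | succ m ih =>
    have h : ((m + 1 : Nat) : Int) = (m : Int) + 1 := by push_cast; ring
    rw [h, PySem.List.pyRange_one_succ_right (by positivity), List.foldl_append, ih]
    simp only [List.foldl, pcStep]
    by_cases hC : xm ≥ 15 + (m : Int) * (ww + 15) ∧ xm ≤ 15 + (m : Int) * (ww + 15) + ww
    · have hqm : q = (m : Int) := by
        apply pc_unique_q (s := ww + 15) (m := (m : Int)) (hs := by omega) (hr0 := hr0) (hrs := hr1)
        · linarith [hC.1]
        · linarith [hC.2]
      have hrw : r ≤ ww := by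
        rw [hqm] at hq; linarith [hC.2]
      rw [if_pos hC, if_pos (show 0 ≤ q ∧ q < (m : Int) + 1 ∧ r ≤ ww from ⟨by omega, by omega, hrw⟩), hqm]
      simp only [Prod.mk.injEq]
      exact ⟨by ring, trivial⟩
    · rw [if_neg hC]
      have hiff : (0 ≤ q ∧ q < (m : Int) + 1 ∧ r ≤ ww) ↔ (0 ≤ q ∧ q < (m : Int) ∧ r ≤ ww) := by
        constructor
        · rintro ⟨h1, h2, h3⟩
          refine ⟨h1, ?_, h3⟩
          rcases lt_or_eq_of_le (by omega : q ≤ (m : Int)) with h4 | h4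
          · exact h4
          · exfalso; rw [h4] at hq; exact hC ⟨by linarith, by linarith⟩
        · rintro ⟨h1, h2, h3⟩; exact ⟨h1, by omega, h3⟩
      rw [if_congr hiff rfl rfl]
      simp only [Prod.mk.injEq]
      exact ⟨by ring, trivial⟩

theorem process_coords_eq (yw ww hw xm ym i : Int) :
    process_coords yw ww hw xm ym i = process_coords_alt yw ww hw xm ym i := by
  have hA : process_coords yw ww hw xm ym i
      = (if ym ≥ yw ∧ ym ≤ yw + hw then
           ((PySem.List.pyRange 0 (i + 1) 1).foldl (pcStep ww xm (i + 1 - 1)) (15, -1)).2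
         else -1) := rfl
  have hB : process_coords_alt yw ww hw xm ym i
      = (if ¬ (yw ≤ ym ∧ ym ≤ yw + hw) ∨ ww < 0 then -1
         else if 0 ≤ PySem.Int.floordiv (xm - 15) (ww + 15)
                  ∧ PySem.Int.floordiv (xm - 15) (ww + 15) ≤ i
                  ∧ PySem.Int.mod (xm - 15) (ww + 15) ≤ ww then
           (if PySem.Int.floordiv (xm - 15) (ww + 15) = i then 0
            else PySem.Int.floordiv (xm - 15) (ww + 15) + 1)
         else -1) := rfl
  rw [hA, hB]
  by_cases hband : ym ≥ yw ∧ ym ≤ yw + hw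
  · rw [if_pos hband]
    by_cases hww : ww < 0
    · rw [if_pos (Or.inr hww)]
      by_cases hi : 0 ≤ i + 1
      · obtain ⟨m, hm⟩ : ∃ m : Nat, i + 1 = (m : Int) := ⟨(i+1).toNat, by omega⟩
        rw [hm, pc_loop_neg ww xm _ hww]
      · rw [PySem.List.pyRange_one_eq_nil (by omega)]
        simp
    · replace hww : 0 ≤ ww := by omega
      rw [if_neg (by simp only [not_or, not_not, not_lt]
                     exact ⟨⟨hband.1, hband.2⟩, hww⟩)]
      set q := PySem.Int.floordiv (xm - 15) (ww + 15) with hqdef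
      set r := PySem.Int.mod (xm - 15) (ww + 15) with hrdef
      have hs : (0:Int) < ww + 15 := by omega
      have hqr : q * (ww + 15) + r = xm - 15 := PySem.Int.floordiv_mul_add_mod _ _
      have hr0 : 0 ≤ r := by
        rw [hrdef, PySem.Int.mod_eq_emod_of_pos hs]; exact Int.emod_nonneg _ (by omega)
      have hr1 : r < ww + 15 := by
        rw [hrdef, PySem.Int.mod_eq_emod_of_pos hs]; exact Int.emod_lt_of_pos _ hs
      by_cases hi : 0 ≤ i + 1
      · obtain ⟨m, hm⟩ : ∃ m : Nat, i + 1 = (m : Int) := ⟨(i+1).toNat, by omega⟩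
        rw [hm, pc_loop_pos ww xm ((m : Int) - 1) q r hww (by linarith) hr0 hr1 m]
        have hiff : (0 ≤ q ∧ q < (m : Int) ∧ r ≤ ww) ↔ (0 ≤ q ∧ q ≤ i ∧ r ≤ ww) := by
          constructor <;> rintro ⟨h1, h2, h3⟩ <;> exact ⟨h1, by omega, h3⟩
        have him : (m : Int) - 1 = i := by omega
        rw [him, if_congr hiff rfl rfl]
      · rw [PySem.List.pyRange_one_eq_nil (by omega),
           if_neg (by rintro ⟨h1, h2, h3⟩; omega)]
        simp
  · rw [if_neg hband, if_pos (Or.inl (fun h => hband ⟨h.1, h.2⟩))]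

-- ===== VERDICT (by name: the statement is the Claim_ definition above) =====
theorem process_coords_spec : Claim_equal_process_coords := by
  intro yw ww hw xm ym i _
  exact process_coords_eq yw ww hw xm ym i
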